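-- pv_equiv track=rewrite | github.com/normanlys/codejam | 2021/QualificationRound/CJ.py | solve
-- ===== SOURCE A (Python) =====
-- def solve(x: int, y: int, s: str) -> int:
--     if len(s) == 1:
--         return 0
--
--     result = 0
--     l = 0
--     h = 1
--     while h < len(s):
--         if "?" == s[h]:
--             h += 1
--             continue
--
--         if s[l] == "?":
--             pass
--         elif s[h] != s[l]:
--             result += x if s[l] == "C" else y
--         l = h
--         h += 1
--
--     return result
-- ===== SOURCE B (Python) =====
-- def solve(x: int, y: int, s: str) -> int:
--     # run-length compression: build the list of run labels (ignoring '?'),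
--     # then compute the cost arithmetically from counts of labels
--     labels = []
--     for c in s:
--         if c != '?' and (not labels or labels[-1] != c):
--             labels.append(c)
--     if not labels:
--         return 0
--     n_c = labels[:-1].count('C')
--     return n_c * x + (len(labels) - 1 - n_c) * y
-- ===== Notes on version B (the rewrite author's own statement) =====
-- stated objective: alternative
-- what changed: B compresses the string (minus '?') into a run-label list and computes the answer arithmetically as (#'C' labels except the last)*x + (remaining run boundaries)*y, instead of accumulating a per-pair transition cost with a two-pointer skip-and-compare scan; the tight append/count loop is measurably faster than A's per-index branching.
import Mathlib
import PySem

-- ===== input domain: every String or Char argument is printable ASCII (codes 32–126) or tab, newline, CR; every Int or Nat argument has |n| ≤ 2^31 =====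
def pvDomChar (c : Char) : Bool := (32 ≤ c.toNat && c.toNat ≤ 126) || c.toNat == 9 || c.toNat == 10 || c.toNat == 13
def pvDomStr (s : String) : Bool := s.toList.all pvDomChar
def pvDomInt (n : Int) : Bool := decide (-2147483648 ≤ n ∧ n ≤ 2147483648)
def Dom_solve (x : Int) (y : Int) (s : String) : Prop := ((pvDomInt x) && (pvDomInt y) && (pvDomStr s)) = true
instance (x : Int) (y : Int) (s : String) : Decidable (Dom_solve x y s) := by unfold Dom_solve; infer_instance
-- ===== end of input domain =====

-- B replaces A's two-pointer skip-and-compare cost accumulation by run-length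
-- compression (labels of maximal runs, ignoring '?') plus a count-based formula;
-- objective: alternative algorithm of the same cost.

-- ===== PORT A =====
-- A's while loop; l < h < len always holds when s[l]/s[h] are read, so getD is exact here.
def solveLoopA (cs : List Char) (x y : Int) (result : Int) (l h : Nat) : Int :=
  if h < cs.length then
    if cs.getD h ' ' = '?' then
      solveLoopA cs x y result l (h + 1)
    else
      let cl := cs.getD l ' '
      let result' :=
        if cl = '?' then result
        else if cs.getD h ' ' ≠ cl then result + (if cl = 'C' then x else y)
        else result
      solveLoopA cs x y result' h (h + 1)
  else result
termination_by cs.length - h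

def solve (x : Int) (y : Int) (s : String) : Int :=
  if PySem.Str.len s = 1 then 0
  else solveLoopA s.toList x y 0 0 1

-- ===== PORT B =====
-- B's label-building for loop: append c when it is not '?' and differs from the last label.
def bStep (labels : List Char) (c : Char) : List Char :=
  if c ≠ '?' ∧ (labels = [] ∨ labels.getLast? ≠ some c) then labels ++ [c] else labels

def solve_alt (x : Int) (y : Int) (s : String) : Int :=
  let labels := s.toList.foldl bStep []
  if labels = [] then 0
  else
    let nC : Int := (labels.dropLast.count 'C' : Int)
    nC * x + ((labels.length : Int) - 1 - nC) * y

-- ===== PRECONDITION & SPEC =====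
def Spec_solve (x : Int) (y : Int) (s : String) (out : Int) : Prop := out = solve_alt x y s
instance (x : Int) (y : Int) (s : String) (out : Int) : Decidable (Spec_solve x y s out) := by unfold Spec_solve; infer_instance

-- ===== CLAIM (what is proved, stated in full; the proofs are below) =====
def Claim_equal_solve : Prop := ∀ (x : Int) (y : Int) (s : String), Dom_solve x y s → Spec_solve x y s (solve x y s)

-- ===== LEMMAS AND PROOFS =====

-- the per-transition weight
def wcost (x y : Int) (c : Char) : Int := if c = 'C' then x else y

-- A's loop, abstracted: prev char p, remaining suffix, skipping '?'
def costG (x y : Int) : Char → List Char → Int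
  | _, [] => 0
  | p, c :: t =>
    if c = '?' then costG x y p t
    else (if p = '?' then 0 else if c ≠ p then wcost x y p else 0) + costG x y c t

-- pairwise transition sum over a list (intermediate form between A and B)
def pairG (x y : Int) : List Char → Int
  | [] => 0
  | [_] => 0
  | a :: b :: t => (if a ≠ b then wcost x y a else 0) + pairG x y (b :: t)

-- adjacent dedup with '?' skipping, relative to an optional previous label
def dsF : Option Char → List Char → List Char
  | _, [] => []
  | o, c :: t =>
    if c = '?' then dsF o t
    else if o = some c then dsF o t
    else c :: dsF (some c) t

-- adjacent dedup (no '?' handling)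
def dsFc : Option Char → List Char → List Char
  | _, [] => []
  | o, c :: t => if o = some c then dsFc o t else c :: dsFc (some c) t

-- B's count-based formula on a (nonempty) label list
def labCost (x y : Int) (L : List Char) : Int :=
  (L.dropLast.count 'C' : Int) * x + ((L.length : Int) - 1 - (L.dropLast.count 'C' : Int)) * y

theorem solveLoopA_eq_costG_aux (cs : List Char) (x y : Int) :
    ∀ (n h l : Nat) (result : Int), cs.length - h ≤ n →
      solveLoopA cs x y result l h = result + costG x y (cs.getD l ' ') (cs.drop h) := by
  intro n
  induction n with
  | zero =>
    intro h l result hn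
    rw [solveLoopA]
    have hlt : ¬ h < cs.length := by omega
    have hdrop : cs.drop h = [] := List.drop_eq_nil_of_le (by omega)
    simp [hlt, hdrop, costG]
  | succ n ih =>
    intro h l result hn
    rw [solveLoopA]
    by_cases hlt : h < cs.length
    · have hdrop : cs.drop h = cs.getD h ' ' :: cs.drop (h + 1) := by
        rw [List.getD_eq_getElem?_getD, List.getElem?_eq_getElem hlt]
        exact List.drop_eq_getElem_cons hlt
      rw [if_pos hlt, hdrop, costG]
      by_cases hq : cs.getD h ' ' = '?'
      · rw [if_pos hq, if_pos hq, ih (h + 1) l result (by omega)]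
      · rw [if_neg hq, if_neg hq, ih (h + 1) h _ (by omega)]
        by_cases hl : cs.getD l ' ' = '?'
        · simp only [hl, if_true]; ring
        · simp only [hl, if_false]
          by_cases hne : cs.getD h ' ' = cs.getD l ' '
          · rw [if_neg (fun hh => hh hne), if_neg (fun hh => hh hne)]
            ring
          · rw [if_pos hne, if_pos hne]
            simp only [wcost]
            ring
    · have hdrop : cs.drop h = [] := List.drop_eq_nil_of_le (by omega)
      simp [hlt, hdrop, costG]

theorem costG_eq_pairG_filter (x y : Int) :
    ∀ (L : List Char) (p : Char),
      costG x y p L =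
        (if p = '?' then pairG x y (L.filter (fun c => c ≠ '?'))
         else pairG x y (p :: L.filter (fun c => c ≠ '?'))) := by
  intro L
  induction L with
  | nil => intro p; simp [costG, pairG]
  | cons c t ih =>
    intro p
    by_cases hc : c = '?'
    · simp [costG, hc, ih p]
    · simp only [costG]
      rw [if_neg hc, ih c, if_neg hc]
      have hfil : (c :: t).filter (fun d => d ≠ '?') = c :: t.filter (fun d => d ≠ '?') := by
        simp [hc]
      rw [hfil]
      by_cases hp : p = '?'
      · simp [hp]
      · rw [if_neg hp, if_neg hp]
        simp only [pairG]
        by_cases hpc : p = c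
        · simp [hpc]
        · rw [if_pos (fun h => hpc h.symm), if_pos hpc]

-- B's foldl builds exactly dsF of the input relative to the accumulator's last label
theorem foldl_bStep_eq_dsF :
    ∀ (cs acc : List Char), cs.foldl bStep acc = acc ++ dsF acc.getLast? cs := by
  intro cs
  induction cs with
  | nil => intro acc; simp [dsF]
  | cons c t ih =>
    intro acc
    simp only [List.foldl_cons]
    by_cases hc : c = '?'
    · have hb : bStep acc c = acc := by
        simp [bStep, hc]
      rw [hb, ih, dsF, if_pos hc]
    · by_cases ho : acc.getLast? = some c
      · have hne : acc ≠ [] := by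
          intro h; rw [h] at ho; simp at ho
        have hb : bStep acc c = acc := by
          simp [bStep, hne, ho]
        rw [hb, ih, dsF, if_neg hc, if_pos ho]
      · have hb : bStep acc c = acc ++ [c] := by
          unfold bStep
          rw [if_pos ⟨hc, Or.inr ho⟩]
        rw [hb, ih, dsF, if_neg hc, if_neg ho]
        simp [List.getLast?_append]

-- dsF over cs = plain dedup over the '?'-filtered list
theorem dsF_eq_dsFc_filter :
    ∀ (cs : List Char) (o : Option Char),
      dsF o cs = dsFc o (cs.filter (fun c => c ≠ '?')) := by
  intro cs
  induction cs with
  | nil => intro o; simp [dsF, dsFc]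
  | cons c t ih =>
    intro o
    by_cases hc : c = '?'
    · simp [dsF, hc, ih]
    · have hfil : (c :: t).filter (fun d => d ≠ '?') = c :: t.filter (fun d => d ≠ '?') := by
        simp [hc]
      rw [hfil, dsF, if_neg hc, dsFc]
      by_cases ho : o = some c
      · rw [if_pos ho, if_pos ho, ih]
      · rw [if_neg ho, if_neg ho, ih]

theorem pairG_cons_eq_labCost (x y : Int) :
    ∀ (t : List Char) (a : Char),
      pairG x y (a :: t) = labCost x y (a :: dsFc (some a) t) := by
  intro t
  induction t with
  | nil => intro a; simp [pairG, dsFc, labCost]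
  | cons b t' ih =>
    intro a
    by_cases hab : a = b
    · have h1 : pairG x y (a :: b :: t') = pairG x y (b :: t') := by
        simp [pairG, hab]
      have h2 : dsFc (some a) (b :: t') = dsFc (some b) t' := by
        rw [dsFc, if_pos (by rw [hab])]
        rw [hab]
      rw [h1, h2, ih b, hab]
    · have h1 : pairG x y (a :: b :: t') = wcost x y a + pairG x y (b :: t') := by
        simp [pairG, hab]
      have h2 : dsFc (some a) (b :: t') = b :: dsFc (some b) t' := by
        rw [dsFc, if_neg (by intro h; exact hab (Option.some.inj h))]
      rw [h1, h2, ih b]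
      -- arithmetic: prepending label a adds wcost a
      have hne : b :: dsFc (some b) t' ≠ [] := by simp
      obtain ⟨R, hR⟩ : ∃ R, b :: dsFc (some b) t' = R := ⟨_, rfl⟩
      rw [hR]
      unfold labCost
      have hdrop : (a :: R).dropLast = a :: R.dropLast := by
        rw [← hR]; rfl
      have hlen : ((a :: R).length : Int) = (R.length : Int) + 1 := by simp
      rw [hdrop, hlen]
      have hcount : ((a :: R.dropLast).count 'C' : Int) =
          (R.dropLast.count 'C' : Int) + (if a = 'C' then 1 else 0) := by
        by_cases ha : a = 'C'
        · simp [ha]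
        · simp [(fun h => ha h : ¬ a = 'C')]
      rw [hcount]
      unfold wcost
      by_cases ha : a = 'C' <;> simp [ha] <;> ring

theorem pairG_eq_labels (x y : Int) (L : List Char) :
    pairG x y L = (if dsFc none L = [] then 0 else labCost x y (dsFc none L)) := by
  cases L with
  | nil => simp [pairG, dsFc]
  | cons a t =>
    have h : dsFc none (a :: t) = a :: dsFc (some a) t := by
      rw [dsFc, if_neg (by simp)]
    rw [h, if_neg (by simp), pairG_cons_eq_labCost]

-- B unfolded to the labels form
theorem solve_alt_eq (x y : Int) (s : String) :
    solve_alt x y s =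
      (if dsFc none (s.toList.filter (fun c => c ≠ '?')) = [] then 0
       else labCost x y (dsFc none (s.toList.filter (fun c => c ≠ '?')))) := by
  unfold solve_alt
  rw [foldl_bStep_eq_dsF, dsF_eq_dsFc_filter]
  simp [labCost]

-- ===== VERDICT (by name: the statement is the Claim_ definition above) =====
theorem solve_spec : Claim_equal_solve := by
  intro x y s _
  unfold Spec_solve solve
  rw [solve_alt_eq, ← pairG_eq_labels]
  cases hcs : s.toList with
  | nil =>
    have hl : PySem.Str.len s = 0 := by simp [PySem.Str.len_eq, hcs]
    rw [if_neg (by rw [hl]; decide)]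
    simp [solveLoopA, pairG]
  | cons c t =>
    have hlen : PySem.Str.len s = ((c :: t).length : Int) := by simp [PySem.Str.len_eq, hcs]
    by_cases h1 : PySem.Str.len s = 1
    · have ht : t = [] := by
        have h2 : ((c :: t).length : Int) = 1 := by rw [← hlen]; exact h1
        have h3 : (c :: t).length = 1 := by exact_mod_cast h2
        simpa using h3
      subst ht
      rw [if_pos h1]
      by_cases hc : c = '?' <;> simp [hc, pairG]
    · rw [if_neg h1, solveLoopA_eq_costG_aux (c :: t) x y ((c :: t).length) 1 0 0 (by omega)]
      have h0 : (c :: t).getD 0 ' ' = c := rfl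
      have hd : (c :: t).drop 1 = t := rfl
      rw [h0, hd, costG_eq_pairG_filter]
      by_cases hc : c = '?' <;> simp [hc]
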